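-- pv_equiv track=rewrite | github.com/Hana19951208/VideoLingo | core/_shared_terminology.py | build_asr_hints
-- ===== SOURCE A (Python) =====
-- def build_asr_hints(terms_json, max_terms=50, max_prompt_chars=200):
--     selected_terms = terms_json.get("terms", [])[:max_terms]
--     hotwords = ", ".join(term["src"] for term in selected_terms if term.get("src"))
--     prompt_terms = []
--     current_length = 0
--     for term in selected_terms:
--         src = term.get("src", "")
--         if not src:
--             continue
--         candidate = src if not prompt_terms else f", {src}"
--         if current_length + len(candidate) > max_prompt_chars:
--             break
--         prompt_terms.append(src)
--         current_length += len(candidate)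
--     return {
--         "hotwords": hotwords,
--         "initial_prompt": ", ".join(prompt_terms),
--     }
-- ===== SOURCE B (Python) =====
-- def build_asr_hints(terms_json, max_terms=50, max_prompt_chars=200):
--     valid = [t["src"] for t in terms_json.get("terms", [])[:max_terms] if t.get("src")]
--     cum = []
--     for s in valid:
--         cum.append((cum[-1] if cum else -2) + 2 + len(s))
--     k = sum(1 for c in cum if c <= max_prompt_chars)
--     return {
--         "hotwords": ", ".join(valid),
--         "initial_prompt": ", ".join(valid[:k]),
--     }
-- ===== Notes on version B (the rewrite author's own statement) =====
-- stated objective: simpler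
-- what changed: Replaces A's break-out accumulator loop with a build-then-select pass: filter the valid srcs once, compute the cumulative joined-prefix lengths, count how many fit, and join that prefix.
import Mathlib
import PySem

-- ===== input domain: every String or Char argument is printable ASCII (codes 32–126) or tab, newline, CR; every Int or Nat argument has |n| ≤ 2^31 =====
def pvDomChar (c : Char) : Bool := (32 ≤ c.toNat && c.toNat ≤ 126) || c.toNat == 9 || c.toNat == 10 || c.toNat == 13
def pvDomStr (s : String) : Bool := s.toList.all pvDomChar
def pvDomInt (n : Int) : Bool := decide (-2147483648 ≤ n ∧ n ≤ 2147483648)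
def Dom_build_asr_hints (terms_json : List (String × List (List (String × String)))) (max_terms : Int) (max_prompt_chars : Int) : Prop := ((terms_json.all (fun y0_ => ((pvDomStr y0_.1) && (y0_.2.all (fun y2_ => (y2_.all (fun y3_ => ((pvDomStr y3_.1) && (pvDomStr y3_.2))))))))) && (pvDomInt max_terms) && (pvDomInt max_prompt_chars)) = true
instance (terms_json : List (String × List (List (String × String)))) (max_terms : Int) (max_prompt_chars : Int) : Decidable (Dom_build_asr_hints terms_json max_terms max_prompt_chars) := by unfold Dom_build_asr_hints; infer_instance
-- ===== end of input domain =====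

-- B replaces A's break-out accumulator loop by a build-then-select pass (filter valid srcs once,
-- cumulative joined-prefix lengths, count how many fit, join that prefix): simpler decomposition, same cost.

-- ===== PORT A =====
-- the generator's filter/value: term.get("src") truthy, value term["src"]
def pvSrc? (term : List (String × String)) : Option String :=
  match (PySem.Dict.mk term).get? "src" with
  | some s => if s = "" then none else some s
  | none => none

-- the body of A's for-loop (break modelled by the stopped flag in the state)
def pvStepT (M : Int) (acc : List String × Int × Bool) (term : List (String × String)) : List String × Int × Bool :=
  if acc.2.2 then acc
  else
    let src := (PySem.Dict.mk term).getD "src" ""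
    if src = "" then acc
    else
      let candidate := if acc.1.isEmpty then src else ", " ++ src
      if acc.2.1 + PySem.Str.len candidate > M then (acc.1, acc.2.1, true)
      else (acc.1 ++ [src], acc.2.1 + PySem.Str.len candidate, false)

def build_asr_hints (terms_json : List (String × List (List (String × String)))) (max_terms : Int) (max_prompt_chars : Int) : List (String × String) :=
  let selected_terms := PySem.List.slice ((PySem.Dict.mk terms_json).getD "terms" []) none (some max_terms)
  let hotwords := PySem.Str.join ", " (selected_terms.filterMap pvSrc?)
  let st := selected_terms.foldl (pvStepT max_prompt_chars) ([], 0, false)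
  [("hotwords", hotwords), ("initial_prompt", PySem.Str.join ", " st.1)]

-- ===== PORT B =====
def build_asr_hints_alt (terms_json : List (String × List (List (String × String)))) (max_terms : Int) (max_prompt_chars : Int) : List (String × String) :=
  let valid := (PySem.List.slice ((PySem.Dict.mk terms_json).getD "terms" []) none (some max_terms)).filterMap pvSrc?
  let cum := valid.foldl (fun (cs : List Int) s =>
      cs ++ [(match cs.getLast? with | some x => x | none => -2) + 2 + PySem.Str.len s]) []
  let k := cum.countP (fun c => decide (c ≤ max_prompt_chars))
  [("hotwords", PySem.Str.join ", " valid),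
   ("initial_prompt", PySem.Str.join ", " (valid.take k))]

-- ===== PRECONDITION & SPEC =====
def Spec_build_asr_hints (terms_json : List (String × List (List (String × String)))) (max_terms : Int) (max_prompt_chars : Int) (out : List (String × String)) : Prop := out = build_asr_hints_alt terms_json max_terms max_prompt_chars
instance (terms_json : List (String × List (List (String × String)))) (max_terms : Int) (max_prompt_chars : Int) (out : List (String × String)) : Decidable (Spec_build_asr_hints terms_json max_terms max_prompt_chars out) := by unfold Spec_build_asr_hints; infer_instance

-- ===== CLAIM (what is proved, stated in full; the proofs are below) =====
def Claim_equal_build_asr_hints : Prop := ∀ (terms_json : List (String × List (List (String × String)))) (max_terms : Int) (max_prompt_chars : Int), Dom_build_asr_hints terms_json max_terms max_prompt_chars → Spec_build_asr_hints terms_json max_terms max_prompt_chars (build_asr_hints terms_json max_terms max_prompt_chars)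

-- ===== LEMMAS AND PROOFS =====

-- A's accepting branch, after the empty-src skip has been factored out (the body of A's loop on a valid src)
def pvStepA (M : Int) (acc : List String × Int × Bool) (src : String) : List String × Int × Bool :=
  if acc.2.2 then acc
  else
    let candidate := if acc.1.isEmpty then src else ", " ++ src
    if acc.2.1 + PySem.Str.len candidate > M then (acc.1, acc.2.1, true)
    else (acc.1 ++ [src], acc.2.1 + PySem.Str.len candidate, false)

-- reference selection: greedy prefix with uniform offset c (c = -2 before the first term)
def pvSelA (M : Int) : Int → List String → List String
  | _, [] => []
  | c, s :: rest => if c + 2 + PySem.Str.len s > M then [] else s :: pvSelA M (c + 2 + PySem.Str.len s) rest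

-- reference cumulative lengths
def pvCumFrom (c : Int) : List String → List Int
  | [] => []
  | s :: rest => (c + 2 + PySem.Str.len s) :: pvCumFrom (c + 2 + PySem.Str.len s) rest

theorem pvFoldA_stopped (M : Int) : ∀ (vs : List String) (acc : List String × Int × Bool),
    acc.2.2 = true → vs.foldl (pvStepA M) acc = acc := by
  intro vs
  induction vs with
  | nil => intro acc _; rfl
  | cons s rest ih =>
      intro acc h
      simp only [List.foldl_cons, pvStepA, h, if_true]
      exact ih acc h

theorem pvStepT_eq (M : Int) (acc : List String × Int × Bool) (term : List (String × String)) :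
    pvStepT M acc term = match pvSrc? term with
      | some s => pvStepA M acc s
      | none => acc := by
  have hD : (PySem.Dict.mk term).getD "src" "" = ((PySem.Dict.mk term).get? "src").getD "" :=
    PySem.Dict.getD_eq_get?_getD _ _ _
  cases hg : (PySem.Dict.mk term).get? "src" with
  | none =>
      simp only [pvSrc?, hg]
      by_cases hs : acc.2.2 <;> simp [pvStepT, hD, hg, hs]
  | some s =>
      by_cases hs : s = ""
      · subst hs
        simp only [pvSrc?, hg]
        by_cases hst : acc.2.2 <;> simp [pvStepT, hD, hg, hst]
      · simp only [pvSrc?, hg, if_neg hs]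
        by_cases hst : acc.2.2 <;> simp [pvStepT, pvStepA, hD, hg, hst, hs]

theorem pvFold_terms_eq (M : Int) : ∀ (ts : List (List (String × String))) (acc : List String × Int × Bool),
    ts.foldl (pvStepT M) acc = (ts.filterMap pvSrc?).foldl (pvStepA M) acc := by
  intro ts
  induction ts with
  | nil => intro acc; rfl
  | cons t rest ih =>
      intro acc
      rw [List.foldl_cons, List.filterMap_cons, pvStepT_eq]
      cases hg : pvSrc? t with
      | none => simp only [ih]
      | some s => simp only [List.foldl_cons, ih]

theorem pvLen_sep_append (s : String) : PySem.Str.len (", " ++ s) = 2 + PySem.Str.len s := by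
  simp [PySem.Str.len_eq]; omega

theorem pvFoldA_selA (M : Int) : ∀ (vs : List String) (pts : List String) (c : Int),
    (pts = [] → c = 0) →
    (vs.foldl (pvStepA M) (pts, c, false)).1 = pts ++ pvSelA M (if pts = [] then -2 else c) vs := by
  intro vs
  induction vs with
  | nil => intro pts c _; simp [pvSelA]
  | cons s rest ih =>
      intro pts c hc
      rw [List.foldl_cons]
      cases pts with
      | nil =>
          have hc0 : c = 0 := hc rfl
          subst hc0
          simp only [pvStepA, List.isEmpty_nil, if_true, Bool.false_eq_true, if_false,
            List.nil_append]
          by_cases hM : (0 : Int) + PySem.Str.len s > M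
          · rw [if_pos hM, pvFoldA_stopped M rest _ rfl]
            simp only [pvSelA]
            rw [if_pos (by omega : (-2 : Int) + 2 + PySem.Str.len s > M)]
          · rw [if_neg hM, ih [s] (0 + PySem.Str.len s) (by simp)]
            simp only [pvSelA]
            rw [if_neg (by omega : ¬ ((-2 : Int) + 2 + PySem.Str.len s > M))]
            have he : (-2 : Int) + 2 + PySem.Str.len s = 0 + PySem.Str.len s := by omega
            rw [he]
            simp
      | cons p ps =>
          have hlen : PySem.Str.len (if (p :: ps).isEmpty then s else ", " ++ s)
              = 2 + PySem.Str.len s := by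
            simp only [List.isEmpty_cons, Bool.false_eq_true, if_false]
            exact pvLen_sep_append s
          simp only [pvStepA, Bool.false_eq_true, if_false, hlen]
          by_cases hM : c + (2 + PySem.Str.len s) > M
          · rw [if_pos hM, pvFoldA_stopped M rest _ rfl]
            rw [if_neg (show ¬ (p :: ps = []) by simp)]
            simp only [pvSelA]
            rw [if_pos (by omega : c + 2 + PySem.Str.len s > M)]
            simp
          · rw [if_neg hM, ih ((p :: ps) ++ [s]) (c + (2 + PySem.Str.len s)) (by simp)]
            rw [if_neg (show ¬ (p :: ps ++ [s] = []) by simp),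
                if_neg (show ¬ (p :: ps = []) by simp)]
            simp only [pvSelA]
            rw [if_neg (by omega : ¬ (c + 2 + PySem.Str.len s > M))]
            have he : c + (2 + PySem.Str.len s) = c + 2 + PySem.Str.len s := by ring
            rw [he]
            simp

theorem pvFoldB_cum : ∀ (vs : List String) (cs : List Int),
    vs.foldl (fun (cs : List Int) s =>
      cs ++ [(match cs.getLast? with | some x => x | none => -2) + 2 + PySem.Str.len s]) cs
    = cs ++ pvCumFrom ((cs.getLast?).getD (-2)) vs := by
  intro vs
  induction vs with
  | nil => intro cs; simp [pvCumFrom]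
  | cons s rest ih =>
      intro cs
      simp only [List.foldl_cons]
      rw [ih]
      have hlast : (cs ++ [(match cs.getLast? with | some x => x | none => -2) + 2 + PySem.Str.len s]).getLast?
          = some ((match cs.getLast? with | some x => x | none => -2) + 2 + PySem.Str.len s) := by
        simp
      rw [hlast]
      cases hg : cs.getLast? <;>
        simp [pvCumFrom, List.append_assoc]

theorem pvCumFrom_gt : ∀ (vs : List String) (c : Int), ∀ x ∈ pvCumFrom c vs, c < x := by
  intro vs
  induction vs with
  | nil => intro c x hx; simp [pvCumFrom] at hx
  | cons s rest ih =>
      intro c x hx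
      simp only [pvCumFrom, List.mem_cons] at hx
      have hlen : (0 : Int) ≤ PySem.Str.len s := by simp [PySem.Str.len_eq]
      rcases hx with rfl | hx
      · omega
      · have := ih (c + 2 + PySem.Str.len s) x hx; omega

theorem pvSelA_take (M : Int) : ∀ (vs : List String) (c : Int),
    pvSelA M c vs = vs.take ((pvCumFrom c vs).countP (fun x => decide (x ≤ M))) := by
  intro vs
  induction vs with
  | nil => intro c; simp [pvSelA, pvCumFrom]
  | cons s rest ih =>
      intro c
      simp only [pvSelA, pvCumFrom, List.countP_cons]
      by_cases hM : c + 2 + PySem.Str.len s > M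
      · rw [if_pos hM]
        have h0 : ¬ (c + 2 + PySem.Str.len s ≤ M) := by omega
        have hrest : (pvCumFrom (c + 2 + PySem.Str.len s) rest).countP (fun x => decide (x ≤ M)) = 0 := by
          rw [List.countP_eq_zero]
          intro x hx
          have := pvCumFrom_gt rest (c + 2 + PySem.Str.len s) x hx
          simp only [decide_eq_true_eq]
          omega
        rw [hrest, if_neg (by simp only [decide_eq_true_eq]; exact h0)]
        simp
      · rw [if_neg hM]
        have h1 : c + 2 + PySem.Str.len s ≤ M := by omega
        rw [if_pos (by simp only [decide_eq_true_eq]; exact h1), List.take_succ_cons, ih]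

-- ===== VERDICT (by name: the statement is the Claim_ definition above) =====
theorem build_asr_hints_spec : Claim_equal_build_asr_hints := by
  intro terms_json max_terms max_prompt_chars _
  simp only [Spec_build_asr_hints, build_asr_hints, build_asr_hints_alt]
  rw [pvFold_terms_eq max_prompt_chars, pvFoldA_selA max_prompt_chars _ [] 0 (fun _ => rfl),
      pvFoldB_cum]
  simp [pvSelA_take]
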